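-- pv_equiv track=rewrite | github.com/yephonekyaw/coursera_dsa | Course-4 Algorithms on Strings/Week-4/3_suffix_array_matching/suffix_array_matching.py | first_class_computing
-- ===== SOURCE A (Python) =====
-- def first_class_computing(order, text):
--     old_class = [0] * len(text)
--     for i in range(1, len(text)):
--         if text[order[i]] != text[order[i - 1]]:
--             old_class[order[i]] = old_class[order[i - 1]] + 1
--         else:
--             old_class[order[i]] = old_class[order[i - 1]]
--     return old_class
-- ===== SOURCE B (Python) =====
-- def first_class_computing(order, text):
--     n = len(text)
--     # pass 1: 0/1 change flags between consecutive sorted suffixes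
--     deltas = [1 if text[order[i]] != text[order[i - 1]] else 0 for i in range(1, n)]
--     # pass 2: prefix sums = class numbers in sorted order
--     prefix = [0]
--     for d in deltas:
--         prefix.append(prefix[-1] + d)
--     # pass 3: scatter into text positions
--     old_class = [0] * n
--     for i in range(1, n):
--         old_class[order[i]] = prefix[i]
--     return old_class
-- ===== Notes on version B (the rewrite author's own statement) =====
-- stated objective: alternative
-- what changed: A's single interleaved loop that reads class values back out of the partially-built old_class array is split into three independent passes: a change-flag list, a prefix-sum table over it, and a scatter of the table through order.
import Mathlib
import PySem

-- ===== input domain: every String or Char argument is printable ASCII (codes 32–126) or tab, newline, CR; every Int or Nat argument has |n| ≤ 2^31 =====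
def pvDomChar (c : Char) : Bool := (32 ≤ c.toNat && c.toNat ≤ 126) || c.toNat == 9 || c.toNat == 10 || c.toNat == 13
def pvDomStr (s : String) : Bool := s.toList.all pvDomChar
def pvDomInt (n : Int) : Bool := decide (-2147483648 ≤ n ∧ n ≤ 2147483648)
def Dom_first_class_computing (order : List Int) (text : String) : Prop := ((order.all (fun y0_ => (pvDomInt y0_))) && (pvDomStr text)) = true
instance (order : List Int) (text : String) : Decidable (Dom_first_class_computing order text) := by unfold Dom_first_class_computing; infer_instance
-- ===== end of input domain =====

-- B replaces A's interleaved loop (which reads class values back out of the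
-- partially built old_class array) by three independent passes — change flags,
-- prefix sums, scatter; objective: alternative decomposition, same O(n) cost.

-- ===== PORT A =====
def first_class_computing (order : List Int) (text : String) : List Int :=
  let chars := text.toList
  let n := chars.length
  (PySem.List.pyRange 1 (n : Int) 1).foldl (fun old_class i =>
    let ci := PySem.List.pyGetD chars (PySem.List.pyGetD order i 0) ' '
    let cj := PySem.List.pyGetD chars (PySem.List.pyGetD order (i - 1) 0) ' '
    let v := PySem.List.pyGetD old_class (PySem.List.pyGetD order (i - 1) 0) 0
    PySem.List.pySetD old_class (PySem.List.pyGetD order i 0)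
      (if ci ≠ cj then v + 1 else v))
    (List.replicate n 0)

-- ===== PORT B =====
def first_class_computing_alt (order : List Int) (text : String) : List Int :=
  let chars := text.toList
  let n := chars.length
  let deltas := (PySem.List.pyRange 1 (n : Int) 1).map (fun i =>
    if PySem.List.pyGetD chars (PySem.List.pyGetD order i 0) ' '
        ≠ PySem.List.pyGetD chars (PySem.List.pyGetD order (i - 1) 0) ' '
      then (1 : Int) else 0)
  let pre := deltas.foldl (fun p d => p ++ [PySem.List.pyGetD p (-1) 0 + d]) [0]
  (PySem.List.pyRange 1 (n : Int) 1).foldl (fun old_class i =>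
    PySem.List.pySetD old_class (PySem.List.pyGetD order i 0)
      (PySem.List.pyGetD pre i 0))
    (List.replicate n 0)

-- ===== PRECONDITION & SPEC =====
-- Pre_ is exactly A's non-raising domain: when len(text) ≥ 2, every order[i]
-- for i < len(text) must exist and be a valid (possibly negative) text index.
def Pre_first_class_computing (order : List Int) (text : String) : Prop :=
  2 ≤ text.toList.length →
    ∀ i : Nat, i < text.toList.length →
      PySem.Raise.InRange order.length (i : Int) ∧
      PySem.Raise.InRange text.toList.length (PySem.List.pyGetD order (i : Int) 0)
instance (order : List Int) (text : String) : Decidable (Pre_first_class_computing order text) := by unfold Pre_first_class_computing; infer_instance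

def pvWitness_first_class_computing : List Int × String := ([2, 0, -2], "aba")

def Spec_first_class_computing (order : List Int) (text : String) (out : List Int) : Prop := out = first_class_computing_alt order text
instance (order : List Int) (text : String) (out : List Int) : Decidable (Spec_first_class_computing order text out) := by unfold Spec_first_class_computing; infer_instance

-- ===== CLAIM (what is proved, stated in full; the proofs are below) =====
def Claim_equal_first_class_computing : Prop := ∀ (order : List Int) (text : String), Dom_first_class_computing order text → Pre_first_class_computing order text → Spec_first_class_computing order text (first_class_computing order text)

-- ===== LEMMAS AND PROOFS =====

-- the 0/1 change flag of B's first pass, as a function of the loop index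
def pvDelta (order : List Int) (chars : List Char) (i : Int) : Int :=
  if PySem.List.pyGetD chars (PySem.List.pyGetD order i 0) ' '
      ≠ PySem.List.pyGetD chars (PySem.List.pyGetD order (i - 1) 0) ' '
    then 1 else 0

-- the class number of the k-th suffix in sorted order (prefix sum of the flags)
def pvP (order : List Int) (chars : List Char) : Nat → Int
  | 0 => 0
  | k + 1 => pvP order chars k + pvDelta order chars ((k : Int) + 1)

-- A's loop body (the port's lambda, zeta-reduced)
def pvAstep (order : List Int) (chars : List Char) (old : List Int) (i : Int) : List Int :=
  PySem.List.pySetD old (PySem.List.pyGetD order i 0)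
    (if PySem.List.pyGetD chars (PySem.List.pyGetD order i 0) ' '
        ≠ PySem.List.pyGetD chars (PySem.List.pyGetD order (i - 1) 0) ' '
      then PySem.List.pyGetD old (PySem.List.pyGetD order (i - 1) 0) 0 + 1
      else PySem.List.pyGetD old (PySem.List.pyGetD order (i - 1) 0) 0)

-- B's scatter body
def pvBstep (order : List Int) (pre : List Int) (old : List Int) (i : Int) : List Int :=
  PySem.List.pySetD old (PySem.List.pyGetD order i 0) (PySem.List.pyGetD pre i 0)

theorem first_class_computing_eq_fold (order : List Int) (text : String) :
    first_class_computing order text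
      = (PySem.List.pyRange 1 (text.toList.length : Int) 1).foldl
          (pvAstep order text.toList) (List.replicate text.toList.length 0) := rfl

theorem first_class_computing_alt_eq_fold (order : List Int) (text : String) :
    first_class_computing_alt order text
      = (PySem.List.pyRange 1 (text.toList.length : Int) 1).foldl
          (pvBstep order
            (((PySem.List.pyRange 1 (text.toList.length : Int) 1).map
                (pvDelta order text.toList)).foldl
              (fun p d => p ++ [PySem.List.pyGetD p (-1) 0 + d]) [0]))
          (List.replicate text.toList.length 0) := rfl

theorem pySetD_neg (xs : List Int) (i : Int) (v : Int) (h1 : -(xs.length : Int) ≤ i) (h2 : i < 0) :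
    PySem.List.pySetD xs i v = xs.set (xs.length - (-i).toNat) v := by
  simp only [PySem.List.pySetD, PySem.List.pySet?, PySem.List.pyIdx?]
  rw [if_neg (by omega), if_pos (by omega)]
  simp

theorem getD_setD_self (xs : List Int) (i : Int) (v : Int) (h : PySem.Raise.InRange xs.length i) :
    PySem.List.pyGetD (PySem.List.pySetD xs i v) i 0 = v := by
  obtain ⟨h1, h2⟩ := h
  rcases le_or_gt 0 i with hi | hi
  · rw [PySem.List.pySetD_of_nonneg xs v hi,
      PySem.List.pyGetD_eq_getElem (xs.set i.toNat v) 0 hi (by simpa using h2)]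
    exact List.getElem_set_self _
  · obtain ⟨k, hk0, rfl⟩ : ∃ k : Nat, 0 < k ∧ i = -(k : Int) := ⟨(-i).toNat, by omega, by omega⟩
    rw [pySetD_neg xs _ v h1 hi]
    have hk : k ≤ xs.length := by omega
    rw [PySem.List.pyGetD_neg_natCast (xs.set (xs.length - (- -(k : Int)).toNat) v) k 0 hk0
      (by simpa using hk)]
    simp only [List.length_set]
    simp

theorem getD_replicate_zero (n : Nat) (i : Int) :
    PySem.List.pyGetD (List.replicate n (0 : Int)) i 0 = 0 := by
  by_cases h : PySem.Raise.InRange (List.replicate n (0 : Int)).length i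
  · exact List.eq_of_mem_replicate (PySem.List.pyGetD_mem _ 0 h)
  · exact PySem.List.pyGetD_of_none _ _ _ ((PySem.List.pyGet?_eq_none_iff _ _).2 h)

-- B's second pass really builds the prefix-sum table [pvP 0, …, pvP (m-1)]
theorem pre_eq (order : List Int) (chars : List Char) :
    ∀ m : Nat, 1 ≤ m →
      (((PySem.List.pyRange 1 (m : Int) 1).map (pvDelta order chars)).foldl
          (fun p d => p ++ [PySem.List.pyGetD p (-1) 0 + d]) [0])
        = (List.range m).map (pvP order chars) := by
  intro m hm
  induction m, hm using Nat.le_induction with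
  | base => simp [PySem.List.pyRange_one_eq_nil (le_refl (1 : Int)), List.range_succ, pvP]
  | succ m hm ih =>
    have hcast : ((m : Int) + 1) = ((m + 1 : Nat) : Int) := by push_cast; ring
    rw [← hcast, PySem.List.pyRange_one_succ_right (by exact_mod_cast hm), List.map_append,
      List.foldl_append, ih]
    obtain ⟨j, rfl⟩ : ∃ j, m = j + 1 := ⟨m - 1, by omega⟩
    simp only [List.map_cons, List.map_nil, List.foldl_cons, List.foldl_nil]
    rw [List.range_succ (n := j + 1), List.map_append]
    congr 1
    rw [List.range_succ (n := j)]
    simp only [List.map_append, List.map_cons, List.map_nil,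
      PySem.List.pyGetD_neg_one_append_singleton]
    have hj : pvP order chars (j + 1) = pvP order chars j + pvDelta order chars ((j : Int) + 1) := rfl
    have harg : ((j : Int) + 1) = ((j + 1 : Nat) : Int) := by push_cast; ring
    rw [hj, harg]

theorem pre_getD (order : List Int) (chars : List Char) (n k : Nat) (hk : k < n) :
    PySem.List.pyGetD ((List.range n).map (pvP order chars)) ((k : Nat) : Int) 0
      = pvP order chars k := by
  rw [PySem.List.pyGetD_natCast]
  exact PySem.List.getD_map_range _ _ _ _ hk

-- loop invariant: after the iterations 1..m-1, A's state equals B's scatter of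
-- the prefix table, keeps length n, and holds pvP (m-1) at slot order[m-1]
theorem main_inv (order : List Int) (chars : List Char)
    (H : ∀ i : Nat, i < chars.length →
      PySem.Raise.InRange order.length (i : Int) ∧
      PySem.Raise.InRange chars.length (PySem.List.pyGetD order (i : Int) 0)) :
    ∀ m : Nat, 1 ≤ m → m ≤ chars.length →
      ((PySem.List.pyRange 1 (m : Int) 1).foldl (pvAstep order chars)
          (List.replicate chars.length 0)
        = (PySem.List.pyRange 1 (m : Int) 1).foldl
            (pvBstep order ((List.range chars.length).map (pvP order chars)))
            (List.replicate chars.length 0))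
      ∧ ((PySem.List.pyRange 1 (m : Int) 1).foldl (pvAstep order chars)
          (List.replicate chars.length 0)).length = chars.length
      ∧ PySem.List.pyGetD
          ((PySem.List.pyRange 1 (m : Int) 1).foldl (pvAstep order chars)
            (List.replicate chars.length 0))
          (PySem.List.pyGetD order ((m : Int) - 1) 0) 0 = pvP order chars (m - 1) := by
  intro m hm
  induction m, hm using Nat.le_induction with
  | base =>
    intro _
    rw [Nat.cast_one, PySem.List.pyRange_one_eq_nil (le_refl (1 : Int))]
    refine ⟨rfl, by simp, ?_⟩
    simp only [List.foldl_nil]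
    rw [getD_replicate_zero]
    norm_num [pvP]
  | succ m hm ih =>
    intro hle
    obtain ⟨j, rfl⟩ : ∃ j, m = j + 1 := ⟨m - 1, by omega⟩
    obtain ⟨hEq, hLen, hV⟩ := ih (by omega)
    obtain ⟨hOrd, hTxt⟩ := H (j + 1) (by omega)
    have hVs : PySem.List.pyGetD
        ((PySem.List.pyRange 1 ((j + 1 : Nat) : Int) 1).foldl (pvAstep order chars)
          (List.replicate chars.length 0))
        (PySem.List.pyGetD order (((j + 1 : Nat) : Int) - 1) 0) 0 = pvP order chars j := by
      simpa using hV
    have hcast : ((j + 1 + 1 : Nat) : Int) = ((j + 1 : Nat) : Int) + 1 := by push_cast; ring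
    rw [hcast, PySem.List.pyRange_one_succ_right (by exact_mod_cast hm)]
    simp only [List.foldl_append, List.foldl_cons, List.foldl_nil]
    have hAval : pvAstep order chars
        ((PySem.List.pyRange 1 ((j + 1 : Nat) : Int) 1).foldl (pvAstep order chars)
          (List.replicate chars.length 0)) (((j + 1 : Nat) : Int))
        = PySem.List.pySetD
            ((PySem.List.pyRange 1 ((j + 1 : Nat) : Int) 1).foldl (pvAstep order chars)
              (List.replicate chars.length 0))
            (PySem.List.pyGetD order (((j + 1 : Nat) : Int)) 0) (pvP order chars (j + 1)) := by
      rw [pvAstep]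
      congr 1
      have hj : pvP order chars (j + 1) = pvP order chars j + pvDelta order chars ((j : Int) + 1) := rfl
      have harg : ((j : Int) + 1) = ((j + 1 : Nat) : Int) := by push_cast; ring
      rw [hj, harg, pvDelta, hVs]
      split <;> ring
    have hBval : pvBstep order ((List.range chars.length).map (pvP order chars))
        ((PySem.List.pyRange 1 ((j + 1 : Nat) : Int) 1).foldl
          (pvBstep order ((List.range chars.length).map (pvP order chars)))
          (List.replicate chars.length 0)) (((j + 1 : Nat) : Int))
        = PySem.List.pySetD
            ((PySem.List.pyRange 1 ((j + 1 : Nat) : Int) 1).foldl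
              (pvBstep order ((List.range chars.length).map (pvP order chars)))
              (List.replicate chars.length 0))
            (PySem.List.pyGetD order (((j + 1 : Nat) : Int)) 0) (pvP order chars (j + 1)) := by
      rw [pvBstep, pre_getD order chars chars.length (j + 1) (by omega)]
    refine ⟨?_, ?_, ?_⟩
    · rw [hAval, hBval, hEq]
    · rw [hAval, PySem.List.length_pySetD, hLen]
    · have hidx : ((j + 1 : Nat) : Int) + 1 - 1 = ((j + 1 : Nat) : Int) := by ring
      rw [hidx, hAval]
      have hsub : (j + 1 + 1) - 1 = j + 1 := by omega
      rw [hsub]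
      exact getD_setD_self _ _ _ (by rw [hLen]; exact hTxt)

-- ===== VERDICT (by name: the statement is the Claim_ definition above) =====
theorem first_class_computing_spec : Claim_equal_first_class_computing := by
  intro order text _ hPre
  unfold Spec_first_class_computing
  by_cases hn : text.toList.length ≤ 1
  · have h1 : ((text.toList.length : Nat) : Int) ≤ 1 := by exact_mod_cast hn
    rw [first_class_computing_eq_fold, first_class_computing_alt_eq_fold,
      PySem.List.pyRange_one_eq_nil h1]
    simp
  · push Not at hn
    have H := hPre (by omega)
    rw [first_class_computing_eq_fold, first_class_computing_alt_eq_fold,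
      pre_eq order text.toList text.toList.length (by omega)]
    exact (main_inv order text.toList H text.toList.length (by omega) (le_refl _)).1
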